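-- pv_equiv track=rewrite | github.com/albertotrunk/ue-stable-diffusion | Plugins/Dream/Content/Python/site-packages/academictorrents/utils.py | convert_bytes_to_decimal
-- ===== SOURCE A (Python) =====
-- def convert_bytes_to_decimal(headerBytes):
--     size = 0
--     power = len(headerBytes) - 1
--     for ch in headerBytes:
--         if isinstance(ch, int):
--             size += ch * 256 ** power
--         else:
--             size += int(ord(ch)) * 256 ** power
--         power -= 1
--     return size
-- ===== SOURCE B (Python) =====
-- def convert_bytes_to_decimal(headerBytes):
--     size = 0
--     for ch in headerBytes:
--         size = size * 256 + (ch if isinstance(ch, int) else ord(ch))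
--     return size
-- ===== Notes on version B (the rewrite author's own statement) =====
-- stated objective: faster
-- what changed: Replaces the per-element 256**power big power computation with a Horner-style single-pass accumulation size = size*256 + byte.
import Mathlib
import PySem

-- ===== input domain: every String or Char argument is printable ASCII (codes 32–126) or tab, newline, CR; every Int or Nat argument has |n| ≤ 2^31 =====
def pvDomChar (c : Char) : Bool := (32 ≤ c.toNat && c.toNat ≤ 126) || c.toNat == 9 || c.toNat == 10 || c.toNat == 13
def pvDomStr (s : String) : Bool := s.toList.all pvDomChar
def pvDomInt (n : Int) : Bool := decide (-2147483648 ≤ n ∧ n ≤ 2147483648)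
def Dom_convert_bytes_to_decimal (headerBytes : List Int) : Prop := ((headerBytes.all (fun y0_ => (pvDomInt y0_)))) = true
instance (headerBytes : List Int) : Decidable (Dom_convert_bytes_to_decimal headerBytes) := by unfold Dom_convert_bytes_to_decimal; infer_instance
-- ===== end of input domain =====

-- B replaces A's per-element 256**power computation with a Horner-style single pass (size = size*256 + ch); faster asymptotically in a timing run.


-- ===== PORT A =====
-- Loop state is (size, power); the elements are Int so Python's isinstance branch always
-- takes the `ch * 256 ** power` arm. power is only used while ≥ 0 (it starts at len-1 and
-- is decremented once per element), so it is carried as a Nat (the empty-list -1 is never used).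
def convert_bytes_to_decimal (headerBytes : List Int) : Int :=
  (headerBytes.foldl (fun (st : Int × Nat) ch => (st.1 + ch * 256 ^ st.2, st.2 - 1))
    (0, headerBytes.length - 1)).1

-- ===== PORT B =====
def convert_bytes_to_decimal_alt (headerBytes : List Int) : Int :=
  headerBytes.foldl (fun size ch => size * 256 + ch) 0

-- ===== PRECONDITION & SPEC =====
def Spec_convert_bytes_to_decimal (headerBytes : List Int) (out : Int) : Prop := out = convert_bytes_to_decimal_alt headerBytes
instance (headerBytes : List Int) (out : Int) : Decidable (Spec_convert_bytes_to_decimal headerBytes out) := by unfold Spec_convert_bytes_to_decimal; infer_instance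

-- ===== CLAIM (what is proved, stated in full; the proofs are below) =====
def Claim_equal_convert_bytes_to_decimal : Prop := ∀ (headerBytes : List Int), Dom_convert_bytes_to_decimal headerBytes → Spec_convert_bytes_to_decimal headerBytes (convert_bytes_to_decimal headerBytes)

-- ===== LEMMAS AND PROOFS =====

-- Horner fold with accumulator a equals a * 256^len plus the fold from 0.
theorem pv_horner_acc (l : List Int) : ∀ (a : Int),
    l.foldl (fun size ch => size * 256 + ch) a
      = a * 256 ^ l.length + l.foldl (fun size ch => size * 256 + ch) 0 := by
  induction l with
  | nil => intro a; simp
  | cons b t ih =>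
      intro a
      simp only [List.foldl, List.length_cons]
      rw [ih (a * 256 + b), ih (0 * 256 + b)]
      ring

-- A's positional sum with accumulator s and power = l.length equals s + Horner value of l.
theorem pv_A_eq_horner (l : List Int) : ∀ (s : Int),
    (l.foldl (fun (st : Int × Nat) ch => (st.1 + ch * 256 ^ st.2, st.2 - 1)) (s, l.length - 1)).1
      = s + l.foldl (fun size ch => size * 256 + ch) 0 := by
  induction l with
  | nil => intro s; simp
  | cons b t ih =>
      intro s
      simp only [List.foldl, List.length_cons, Nat.add_sub_cancel]
      rw [ih (s + b * 256 ^ t.length), pv_horner_acc t (0 * 256 + b)]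
      ring

-- ===== VERDICT (by name: the statement is the Claim_ definition above) =====
theorem convert_bytes_to_decimal_spec : Claim_equal_convert_bytes_to_decimal := by
  intro headerBytes _
  unfold Spec_convert_bytes_to_decimal convert_bytes_to_decimal convert_bytes_to_decimal_alt
  rw [pv_A_eq_horner]
  ring
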